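-- pv_equiv track=rewrite | github.com/GuustDel/idf-files | idf_tool/parse_idf.py | get_component_names_by_type
-- ===== SOURCE A (Python) =====
-- def get_component_names_by_type(component_outlines):
--     sbars = []
--     strings = []
--
--     for name, details in component_outlines.items():
--         if details['component_type'] == 'busbar':
--             sbars.append(name)
--         elif details['component_type'] == 'string':
--             strings.append(name)
--
--     return sbars, strings
-- ===== SOURCE B (Python) =====
-- def get_component_names_by_type(component_outlines):
--     def names_of(component_type):
--         return [name for name, details in component_outlines.items()
--                 if details['component_type'] == component_type]
--     return names_of('busbar'), names_of('string')
-- ===== Notes on version B (the rewrite author's own statement) =====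
-- stated objective: idiomatic
-- what changed: Replaces A's single pass with two mutated accumulator lists and an if/elif chain by two staged declarative filter passes: a names_of(type) comprehension helper applied once for 'busbar' and once for 'string'
import Mathlib
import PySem

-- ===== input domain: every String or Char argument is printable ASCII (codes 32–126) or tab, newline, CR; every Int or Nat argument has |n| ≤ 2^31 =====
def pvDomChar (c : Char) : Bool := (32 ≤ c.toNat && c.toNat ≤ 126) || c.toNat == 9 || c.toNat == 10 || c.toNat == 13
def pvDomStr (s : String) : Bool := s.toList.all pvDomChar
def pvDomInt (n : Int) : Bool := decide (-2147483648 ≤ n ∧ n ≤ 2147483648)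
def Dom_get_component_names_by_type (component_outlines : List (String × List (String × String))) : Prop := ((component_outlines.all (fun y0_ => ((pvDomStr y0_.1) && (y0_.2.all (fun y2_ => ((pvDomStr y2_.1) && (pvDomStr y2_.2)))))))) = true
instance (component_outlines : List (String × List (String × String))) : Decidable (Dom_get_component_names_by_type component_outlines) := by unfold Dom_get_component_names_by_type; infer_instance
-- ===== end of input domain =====

-- B replaces A's single accumulating pass with two staged filter passes (a names_of helper applied per type); same O(n) result, more declarative.


-- ===== PORT A =====
-- details['component_type']: Python dict lookup; Pre_ guarantees the key is present, so the .getD "" default is never reached inside Pre_.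
def get_component_names_by_type (component_outlines : List (String × List (String × String))) : List String × List String :=
  component_outlines.foldl
    (fun acc nd =>
      let t := ((PySem.Dict.mk nd.2).get? "component_type").getD ""
      if t = "busbar" then (acc.1 ++ [nd.1], acc.2)
      else if t = "string" then (acc.1, acc.2 ++ [nd.1])
      else acc)
    ([], [])

-- ===== PORT B =====
-- names_of: the comprehension [name for name, details in … if details['component_type'] == t] = filter + map
def names_of (component_outlines : List (String × List (String × String))) (component_type : String) : List String :=
  (component_outlines.filter
    (fun nd => ((PySem.Dict.mk nd.2).get? "component_type").getD "" == component_type)).map (·.1)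

def get_component_names_by_type_alt (component_outlines : List (String × List (String × String))) : List String × List String :=
  (names_of component_outlines "busbar", names_of component_outlines "string")

-- ===== PRECONDITION & SPEC =====
-- Pre_ excludes only entries whose details dict lacks the key 'component_type': the Python A raises KeyError there.
def Pre_get_component_names_by_type (component_outlines : List (String × List (String × String))) : Prop :=
  ∀ nd ∈ component_outlines, "component_type" ∈ nd.2.map Prod.fst
instance (component_outlines : List (String × List (String × String))) : Decidable (Pre_get_component_names_by_type component_outlines) := by unfold Pre_get_component_names_by_type; infer_instance
def pvWitness_get_component_names_by_type : (List (String × List (String × String))) :=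
  [("x", [("component_type", "busbar")]), ("y", [("component_type", "string")]), ("z", [("component_type", "other")])]
def Spec_get_component_names_by_type (component_outlines : List (String × List (String × String))) (out : List String × List String) : Prop := out = get_component_names_by_type_alt component_outlines
instance (component_outlines : List (String × List (String × String))) (out : List String × List String) : Decidable (Spec_get_component_names_by_type component_outlines out) := by unfold Spec_get_component_names_by_type; infer_instance

-- ===== CLAIM (what is proved, stated in full; the proofs are below) =====
def Claim_equal_get_component_names_by_type : Prop := ∀ (component_outlines : List (String × List (String × String))), Dom_get_component_names_by_type component_outlines → Pre_get_component_names_by_type component_outlines → Spec_get_component_names_by_type component_outlines (get_component_names_by_type component_outlines)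

-- ===== LEMMAS AND PROOFS =====

lemma foldA_eq (xs : List (String × List (String × String))) (sb st : List String) :
    xs.foldl
      (fun acc nd =>
        let t := ((PySem.Dict.mk nd.2).get? "component_type").getD ""
        if t = "busbar" then (acc.1 ++ [nd.1], acc.2)
        else if t = "string" then (acc.1, acc.2 ++ [nd.1])
        else acc)
      (sb, st)
    = (sb ++ names_of xs "busbar", st ++ names_of xs "string") := by
  induction xs generalizing sb st with
  | nil => simp [names_of]
  | cons hd tl ih =>
    simp only [List.foldl_cons, names_of, List.filter_cons]
    set t := ((PySem.Dict.mk hd.2).get? "component_type").getD "" with ht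
    by_cases h1 : t = "busbar"
    · simp [h1, ih, names_of]
    · by_cases h2 : t = "string"
      · simp [h2, ih, names_of]
      · simp [h1, h2, ih, names_of]

-- ===== VERDICT (by name: the statement is the Claim_ definition above) =====
theorem get_component_names_by_type_spec : Claim_equal_get_component_names_by_type := by
  intro xs _ _
  unfold Spec_get_component_names_by_type get_component_names_by_type get_component_names_by_type_alt
  rw [foldA_eq]
  simp
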